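-- pv_equiv track=rewrite | github.com/databrickslabs/dbldatagen | dbldatagen/v1/engine/cdc_stateless.py | delete_indices_at_batch
-- ===== SOURCE A (Python) =====
-- import math
--
-- def birth_tick(k: int, initial_rows: int, inserts_per_batch: int) -> int:
--     """Return the batch number when row *k* is created.
--
--     - k < initial_rows -> batch 0 (initial snapshot)
--     - k >= initial_rows -> computed from insert rate
--     """
--     if k < initial_rows:
--         return 0
--     if inserts_per_batch <= 0:
--         raise ValueError(f"Row k={k} >= initial_rows={initial_rows} but " f"inserts_per_batch={inserts_per_batch} <= 0")
--     return ((k - initial_rows) // inserts_per_batch) + 1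
--
-- def death_tick(
--     k: int,
--     initial_rows: int,
--     inserts_per_batch: int,
--     death_period: int | float,
--     min_life: int = 1,
-- ) -> int | float:
--     """Return the batch number when row *k* dies.
--
--     Returns ``math.inf`` if the death_period is infinite (no deletes).
--
--     The formula spaces deaths using modular arithmetic on k:
--         T_death(k) = T_birth(k) + min_life + (k % death_period)
--
--     This ensures:
--     - Every row lives at least ``min_life`` batches
--     - Deaths are spread deterministically across batches
--     - The mapping is O(1) per row
--     """
--     if math.isinf(death_period):
--         return math.inf
--     dp = int(death_period)
--     if dp <= 0:
--         return math.inf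
--     t_birth = birth_tick(k, initial_rows, inserts_per_batch)
--     return t_birth + min_life + (k % dp)
--
-- def max_k_at_batch(
--     batch_n: int,
--     initial_rows: int,
--     inserts_per_batch: int,
-- ) -> int:
--     """Return the exclusive upper bound on k values that exist at batch *batch_n*.
--
--     This is the total number of rows ever created up to and including batch_n.
--     """
--     if batch_n <= 0:
--         return initial_rows
--     return initial_rows + batch_n * inserts_per_batch
--
-- def delete_indices_at_batch(
--     batch_n: int,
--     initial_rows: int,
--     inserts_per_batch: int,
--     death_period: int | float,
--     min_life: int = 1,
-- ) -> list[int]: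
--     """Return all k values whose death_tick equals *batch_n* (brute-force).
--
--     This is an O(N) brute-force implementation used only in tests for
--     verification against the fast version (``delete_indices_at_batch_fast``).
--     Production code should use ``delete_indices_at_batch_fast`` instead.
--     """
--     if math.isinf(death_period) or batch_n <= 0:
--         return []
--     dp = int(death_period)
--     if dp <= 0:
--         return []
--
--     upper_k = max_k_at_batch(batch_n, initial_rows, inserts_per_batch)
--     result = []
--
--     for k in range(upper_k):
--         if death_tick(k, initial_rows, inserts_per_batch, dp, min_life) == batch_n:
--             result.append(k)
--
--     return result
-- ===== SOURCE B (Python) =====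
-- import math
--
-- def _emit(lo, hi, r, dp):
--     """All k in [max(lo,0), hi) with k % dp == r % dp, ascending."""
--     lo = max(lo, 0)
--     if lo >= hi:
--         return []
--     out = []
--     k = lo + (r - lo) % dp
--     while k < hi:
--         out.append(k)
--         k += dp
--     return out
--
-- def delete_indices_at_batch(batch_n, initial_rows, inserts_per_batch, death_period, min_life=1):
--     """Stripe/residue solver: rows born at batch t die at batch_n iff
--     k % dp == batch_n - min_life - t, so emit each residue class directly
--     instead of scanning every row ever created."""
--     if math.isinf(death_period) or batch_n <= 0:
--         return []
--     dp = int(death_period)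
--     if dp <= 0:
--         return []
--     upper_k = initial_rows + batch_n * inserts_per_batch
--     r0 = batch_n - min_life
--     out = _emit(0, min(initial_rows, upper_k), r0, dp) if 0 <= r0 < dp else []
--     if inserts_per_batch > 0:
--         t_lo = max(1, r0 - dp + 1)
--         t_hi = min(batch_n, r0)
--         for t in range(t_lo, t_hi + 1):
--             out += _emit(initial_rows + (t - 1) * inserts_per_batch,
--                          initial_rows + t * inserts_per_batch,
--                          r0 - t, dp)
--     return out
-- ===== Notes on version B (the rewrite author's own statement) =====
-- stated objective: faster
-- what changed: Instead of scanning every row k in range(initial_rows + batch_n*inserts_per_batch) and testing its death_tick, B solves k % dp == batch_n - min_life - t per birth stripe (t = 0 and the at most dp stripes whose residue target lies in [0, dp)) and emits the matching arithmetic progressions directly, so cost is proportional to the output plus dp stripes rather than to all rows ever created.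
import Mathlib
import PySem

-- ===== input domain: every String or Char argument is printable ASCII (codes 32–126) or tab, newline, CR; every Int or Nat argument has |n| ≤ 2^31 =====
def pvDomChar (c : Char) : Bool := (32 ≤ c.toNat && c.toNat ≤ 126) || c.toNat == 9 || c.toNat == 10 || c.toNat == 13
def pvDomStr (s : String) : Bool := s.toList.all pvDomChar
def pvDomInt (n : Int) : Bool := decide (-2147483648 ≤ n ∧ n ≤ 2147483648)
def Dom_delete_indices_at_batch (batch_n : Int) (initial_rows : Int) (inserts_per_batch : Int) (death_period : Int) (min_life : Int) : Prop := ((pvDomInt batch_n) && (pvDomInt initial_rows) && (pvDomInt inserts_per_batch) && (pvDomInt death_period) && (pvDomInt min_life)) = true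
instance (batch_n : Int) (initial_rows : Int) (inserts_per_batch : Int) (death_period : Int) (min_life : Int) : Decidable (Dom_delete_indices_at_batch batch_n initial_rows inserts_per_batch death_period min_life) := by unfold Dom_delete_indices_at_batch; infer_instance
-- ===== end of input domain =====

-- B replaces A's scan of every row ever created by solving k % dp == batch_n - min_life - t
-- per birth stripe and emitting the matching residue classes directly (objective: faster).

-- ===== PORT A =====
-- birth_tick; the 'raise ValueError' branch is modelled as none (it is unreachable from
-- delete_indices_at_batch: there k < upper_k ≤ initial_rows whenever inserts_per_batch ≤ 0).
def birth_tick? (k : Int) (initial_rows : Int) (inserts_per_batch : Int) : Option Int :=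
  if k < initial_rows then some 0
  else if inserts_per_batch ≤ 0 then none
  else some (PySem.Int.floordiv (k - initial_rows) inserts_per_batch + 1)

-- death_tick; death_period here is an Int (math.isinf is False), and the 'return math.inf'
-- branch for dp ≤ 0 is modelled as none: like inf, none never equals `some batch_n` below.
def death_tick? (k : Int) (initial_rows : Int) (inserts_per_batch : Int) (death_period : Int) (min_life : Int) : Option Int :=
  if death_period ≤ 0 then none
  else match birth_tick? k initial_rows inserts_per_batch with
       | none => none
       | some t => some (t + min_life + PySem.Int.mod k death_period)

def max_k_at_batch (batch_n : Int) (initial_rows : Int) (inserts_per_batch : Int) : Int :=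
  if batch_n ≤ 0 then initial_rows else initial_rows + batch_n * inserts_per_batch

def delete_indices_at_batch (batch_n : Int) (initial_rows : Int) (inserts_per_batch : Int) (death_period : Int) (min_life : Int) : List Int :=
  if batch_n ≤ 0 then []            -- math.isinf(death_period) is False on an Int input
  else if death_period ≤ 0 then []  -- dp = int(death_period); dp <= 0
  else
    (PySem.List.pyRange 0 (max_k_at_batch batch_n initial_rows inserts_per_batch) 1).foldl
      (fun acc k =>
        if death_tick? k initial_rows inserts_per_batch death_period min_life = some batch_n
        then acc ++ [k] else acc) []

-- ===== PORT B =====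
-- while k < hi: append k; k += dp   — ported as fuelled structural recursion: with dp ≥ 1
-- (true at every call site), fuel (hi - k).toNat bounds the number of iterations exactly.
def emitGo : Nat → Int → Int → Int → List Int
  | 0, _, _, _ => []
  | f+1, k, hi, dp => if k < hi then k :: emitGo f (k + dp) hi dp else []

-- _emit(lo, hi, r, dp): all k in [max(lo,0), hi) with k % dp == r % dp, ascending
def emit (lo : Int) (hi : Int) (r : Int) (dp : Int) : List Int :=
  let lo' := max lo 0
  if hi ≤ lo' then []
  else
    let k0 := lo' + PySem.Int.mod (r - lo') dp
    emitGo (hi - k0).toNat k0 hi dp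

def delete_indices_at_batch_alt (batch_n : Int) (initial_rows : Int) (inserts_per_batch : Int) (death_period : Int) (min_life : Int) : List Int :=
  if batch_n ≤ 0 then []
  else if death_period ≤ 0 then []
  else
    let dp := death_period
    let upper_k := initial_rows + batch_n * inserts_per_batch
    let r0 := batch_n - min_life
    let out := if 0 ≤ r0 ∧ r0 < dp then emit 0 (min initial_rows upper_k) r0 dp else []
    if 0 < inserts_per_batch then
      (PySem.List.pyRange (max 1 (r0 - dp + 1)) (min batch_n r0 + 1) 1).foldl
        (fun acc t =>
          acc ++ emit (initial_rows + (t - 1) * inserts_per_batch)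
                      (initial_rows + t * inserts_per_batch) (r0 - t) dp) out
    else out

-- ===== PRECONDITION & SPEC =====
def Spec_delete_indices_at_batch (batch_n : Int) (initial_rows : Int) (inserts_per_batch : Int) (death_period : Int) (min_life : Int) (out : List Int) : Prop := out = delete_indices_at_batch_alt batch_n initial_rows inserts_per_batch death_period min_life
instance (batch_n : Int) (initial_rows : Int) (inserts_per_batch : Int) (death_period : Int) (min_life : Int) (out : List Int) : Decidable (Spec_delete_indices_at_batch batch_n initial_rows inserts_per_batch death_period min_life out) := by unfold Spec_delete_indices_at_batch; infer_instance

-- ===== CLAIM (what is proved, stated in full; the proofs are below) =====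
def Claim_equal_delete_indices_at_batch : Prop := ∀ (batch_n : Int) (initial_rows : Int) (inserts_per_batch : Int) (death_period : Int) (min_life : Int), Dom_delete_indices_at_batch batch_n initial_rows inserts_per_batch death_period min_life → Spec_delete_indices_at_batch batch_n initial_rows inserts_per_batch death_period min_life (delete_indices_at_batch batch_n initial_rows inserts_per_batch death_period min_life)

-- ===== LEMMAS AND PROOFS =====

-- The start index of emit's progression: lo ≡ r (mod dp) iff (r - lo) % dp = 0
lemma mod_shift_zero {dp r lo : Int} (hdp : 0 < dp) (hr : 0 ≤ r) (hrdp : r < dp) :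
    PySem.Int.mod lo dp = r ↔ PySem.Int.mod (r - lo) dp = 0 := by
  rw [PySem.Int.mod_eq_emod_of_pos hdp, PySem.Int.mod_eq_emod_of_pos hdp]
  constructor
  · intro h
    have hq := Int.mul_ediv_add_emod lo dp
    rw [h] at hq
    have he : r - lo = 0 + dp * (-(lo / dp)) := by linarith
    rw [he, Int.add_mul_emod_self_left, Int.zero_emod]
  · intro h
    have hq := Int.mul_ediv_add_emod (r - lo) dp
    rw [h] at hq
    have he : lo = r + dp * (-((r - lo) / dp)) := by linarith
    rw [he, Int.add_mul_emod_self_left, Int.emod_eq_of_lt hr hrdp]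

-- How (r - lo) % dp evolves when lo increases by one
lemma mod_shift_succ {dp r lo : Int} (hdp : 0 < dp) :
    PySem.Int.mod (r - (lo + 1)) dp
      = (if PySem.Int.mod (r - lo) dp = 0 then dp - 1 else PySem.Int.mod (r - lo) dp - 1) := by
  simp only [PySem.Int.mod_eq_emod_of_pos hdp]
  have hq := Int.mul_ediv_add_emod (r - lo) dp
  have h0 : 0 ≤ (r - lo) % dp := Int.emod_nonneg _ (by omega)
  have h1 : (r - lo) % dp < dp := Int.emod_lt_of_pos _ hdp
  by_cases hz : (r - lo) % dp = 0
  · rw [if_pos hz]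
    rw [hz] at hq
    have he : r - (lo + 1) = (dp - 1) + dp * ((r - lo) / dp - 1) := by linarith
    rw [he, Int.add_mul_emod_self_left, Int.emod_eq_of_lt (by omega) (by omega)]
  · rw [if_neg hz]
    have he : r - (lo + 1) = ((r - lo) % dp - 1) + dp * ((r - lo) / dp) := by linarith
    rw [he, Int.add_mul_emod_self_left, Int.emod_eq_of_lt (by omega) (by omega)]

lemma emitGo_of_ge {f : Nat} {k hi dp : Int} (h : hi ≤ k) : emitGo f k hi dp = [] := by
  cases f with
  | zero => rfl
  | succ f => simp [emitGo, show ¬ k < hi by omega]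

-- any sufficient fuel computes the same list
lemma emitGo_congr {dp : Int} (hdp : 0 < dp) :
    ∀ (f₁ f₂ : Nat) (k hi : Int), (hi - k).toNat ≤ f₁ → (hi - k).toNat ≤ f₂ →
      emitGo f₁ k hi dp = emitGo f₂ k hi dp := by
  intro f₁
  induction f₁ with
  | zero =>
    intro f₂ k hi h1 h2
    have h : hi ≤ k := by omega
    rw [emitGo_of_ge h, emitGo_of_ge h]
  | succ f ih =>
    intro f₂ k hi h1 h2
    by_cases hk : k < hi
    · obtain ⟨f₂', rfl⟩ : ∃ g, f₂ = g + 1 := ⟨f₂ - 1, by omega⟩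
      simp only [emitGo, if_pos hk]
      rw [ih f₂' (k + dp) hi (by omega) (by omega)]
    · rw [emitGo_of_ge (by omega), emitGo_of_ge (by omega)]

-- emit is exactly "filter the residue class out of the integer range"
lemma emit_eq_filter {dp r : Int} (hdp : 0 < dp) (hr : 0 ≤ r) (hrdp : r < dp) :
    ∀ (n : Nat) (lo hi : Int), 0 ≤ lo → (hi - lo).toNat = n →
      emit lo hi r dp
        = (PySem.List.pyRange lo hi 1).filter (fun x => decide (PySem.Int.mod x dp = r)) := by
  intro n
  induction n with
  | zero =>
    intro lo hi hlo hn
    have hhl : hi ≤ lo := by omega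
    rw [PySem.List.pyRange_one_eq_nil hhl]
    simp [emit, show max lo 0 = lo by omega, hhl]
  | succ n ih =>
    intro lo hi hlo hn
    have hlt : lo < hi := by omega
    have hml : max lo 0 = lo := by omega
    have hml1 : max (lo + 1) 0 = lo + 1 := by omega
    rw [PySem.List.pyRange_one_cons hlt, List.filter_cons,
        ← ih (lo + 1) hi (by omega) (by omega)]
    by_cases hp : PySem.Int.mod lo dp = r
    · have hm0 : PySem.Int.mod (r - lo) dp = 0 := (mod_shift_zero hdp hr hrdp).mp hp
      have hms : PySem.Int.mod (r - (lo + 1)) dp = dp - 1 := by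
        rw [mod_shift_succ hdp, if_pos hm0]
      simp only [hp, decide_true, if_pos]
      show emit lo hi r dp = lo :: emit (lo + 1) hi r dp
      simp only [emit, hml, hml1, hm0, hms, if_neg (show ¬ hi ≤ lo by omega), add_zero]
      have hfuel : (hi - lo).toNat = n + 1 := hn
      by_cases hh1 : hi ≤ lo + 1
      · rw [if_pos hh1, emitGo_congr hdp _ ((hi - lo).toNat) lo hi (le_refl _) (by omega)]
        rw [hfuel]
        simp only [emitGo, if_pos hlt]
        rw [emitGo_of_ge (by omega)]
      · rw [if_neg hh1]
        rw [emitGo_congr hdp _ ((hi - lo).toNat) lo hi (le_refl _) (by omega), hfuel]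
        simp only [emitGo, if_pos hlt]
        have harg : lo + 1 + (dp - 1) = lo + dp := by ring
        rw [harg]
        exact congrArg _ (emitGo_congr hdp _ _ _ _ (by omega) (by omega))
    · have hm0 : PySem.Int.mod (r - lo) dp ≠ 0 := fun h =>
        hp ((mod_shift_zero hdp hr hrdp).mpr h)
      have hmb : 0 ≤ PySem.Int.mod (r - lo) dp ∧ PySem.Int.mod (r - lo) dp < dp := by
        rw [PySem.Int.mod_eq_emod_of_pos hdp]
        exact ⟨Int.emod_nonneg _ (by omega), Int.emod_lt_of_pos _ hdp⟩
      have hms : PySem.Int.mod (r - (lo + 1)) dp = PySem.Int.mod (r - lo) dp - 1 := by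
        rw [mod_shift_succ hdp, if_neg hm0]
      simp only [hp, decide_false, if_neg, Bool.false_eq_true, not_false_eq_true]
      show emit lo hi r dp = emit (lo + 1) hi r dp
      simp only [emit, hml, hml1, hms, if_neg (show ¬ hi ≤ lo by omega)]
      by_cases hh1 : hi ≤ lo + 1
      · rw [if_pos hh1, emitGo_of_ge (by omega)]
      · rw [if_neg hh1]
        have harg : lo + 1 + (PySem.Int.mod (r - lo) dp - 1) = lo + PySem.Int.mod (r - lo) dp := by
          ring
        rw [harg]

-- clamping the lower bound inside emit
lemma emit_clamp (lo hi r dp : Int) : emit lo hi r dp = emit (max lo 0) hi r dp := by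
  have h : max (max lo 0) 0 = max lo 0 := by omega
  simp only [emit, h]

-- the death condition for rows of the initial snapshot (k < initial_rows)
lemma death_eq_lt {bn ir ipb dp ml k : Int} (hdp : 0 < dp) (hk : k < ir) :
    (death_tick? k ir ipb dp ml = some bn) ↔ PySem.Int.mod k dp = bn - ml := by
  simp only [death_tick?, birth_tick?, if_neg (show ¬ dp ≤ 0 by omega), if_pos hk]
  constructor
  · intro h; have := Option.some.inj h; omega
  · intro h; rw [h]; congr 1; omega

-- the death condition inside birth stripe t ≥ 1 (inserts_per_batch > 0)
lemma death_eq_stripe {bn ir ipb dp ml k t : Int} (hdp : 0 < dp) (hipb : 0 < ipb)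
    (ht : 1 ≤ t) (h1 : ir + (t - 1) * ipb ≤ k) (h2 : k < ir + t * ipb) :
    (death_tick? k ir ipb dp ml = some bn) ↔ PySem.Int.mod k dp = bn - ml - t := by
  have hnn : 0 ≤ (t - 1) * ipb := mul_nonneg (by omega) (by omega)
  have hkir : ¬ k < ir := by omega
  have hfd : PySem.Int.floordiv (k - ir) ipb = t - 1 := by
    rw [PySem.Int.floordiv_eq_iff_of_pos hipb]
    have he : (t - 1 + 1) * ipb = t * ipb := by ring
    constructor
    · omega
    · rw [he]; omega
  simp only [death_tick?, birth_tick?, if_neg (show ¬ dp ≤ 0 by omega), if_neg hkir,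
    if_neg (show ¬ ipb ≤ 0 by omega), hfd]
  constructor
  · intro h; have := Option.some.inj h; omega
  · intro h; rw [h]; congr 1; omega

-- residues of k are always in [0, dp)
lemma mod_ne_of_out {dp k c : Int} (hdp : 0 < dp) (hc : ¬ (0 ≤ c ∧ c < dp)) :
    PySem.Int.mod k dp ≠ c := by
  rw [PySem.Int.mod_eq_emod_of_pos hdp]
  have := Int.emod_nonneg k (show dp ≠ 0 by omega)
  have := Int.emod_lt_of_pos k hdp
  omega

-- the initial-snapshot part [0, hi') of the scan, hi' ≤ initial_rows
lemma stripe0_filter {bn ir ipb dp ml hi' : Int} (hdp : 0 < dp) (hhi : hi' ≤ ir) :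
    (PySem.List.pyRange 0 hi' 1).filter
        (fun k => decide (death_tick? k ir ipb dp ml = some bn))
      = if 0 ≤ bn - ml ∧ bn - ml < dp then emit 0 hi' (bn - ml) dp else [] := by
  by_cases hw : 0 ≤ bn - ml ∧ bn - ml < dp
  · rw [if_pos hw, emit_eq_filter hdp hw.1 hw.2 ((hi' - 0).toNat) 0 hi' (le_refl 0) rfl]
    apply List.filter_congr
    intro x hx
    rw [PySem.List.mem_pyRange_one] at hx
    simp only [decide_eq_decide]
    exact death_eq_lt hdp (by omega)
  · rw [if_neg hw]
    apply List.filter_eq_nil_iff.mpr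
    intro x hx
    rw [PySem.List.mem_pyRange_one] at hx
    simp only [decide_eq_true_eq]
    intro h
    exact mod_ne_of_out hdp hw ((death_eq_lt hdp (by omega)).mp h)

-- one birth stripe t of the scan is emit-or-empty, depending on the residue window
lemma stripeT_filter {bn ir ipb dp ml t : Int} (hdp : 0 < dp) (hipb : 0 < ipb)
    (ht : 1 ≤ t) :
    (PySem.List.pyRange (max (ir + (t - 1) * ipb) 0) (ir + t * ipb) 1).filter
        (fun k => decide (death_tick? k ir ipb dp ml = some bn))
      = if 0 ≤ bn - ml - t ∧ bn - ml - t < dp then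
          emit (ir + (t - 1) * ipb) (ir + t * ipb) (bn - ml - t) dp
        else [] := by
  by_cases hw : 0 ≤ bn - ml - t ∧ bn - ml - t < dp
  · rw [if_pos hw, emit_clamp,
      emit_eq_filter hdp hw.1 hw.2 ((ir + t * ipb - max (ir + (t - 1) * ipb) 0).toNat) _ _
        (by omega) rfl]
    apply List.filter_congr
    intro x hx
    rw [PySem.List.mem_pyRange_one] at hx
    simp only [decide_eq_decide]
    exact death_eq_stripe hdp hipb ht (by omega) hx.2
  · rw [if_neg hw]
    apply List.filter_eq_nil_iff.mpr
    intro x hx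
    rw [PySem.List.mem_pyRange_one] at hx
    simp only [decide_eq_true_eq]
    intro h
    exact mod_ne_of_out hdp hw ((death_eq_stripe hdp hipb ht (by omega) hx.2).mp h)

-- [0, initial_rows + n*ipb) splits into the initial segment and the n birth stripes
lemma range_decomp (ir ipb : Int) (hipb : 0 < ipb) :
    ∀ n : Nat,
      PySem.List.pyRange 0 (ir + (n : Int) * ipb) 1
        = PySem.List.pyRange 0 ir 1
          ++ (PySem.List.pyRange 1 ((n : Int) + 1) 1).flatMap
              (fun t => PySem.List.pyRange (max (ir + (t - 1) * ipb) 0) (ir + t * ipb) 1) := by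
  intro n
  induction n with
  | zero =>
    simp [PySem.List.pyRange_one_eq_nil (le_refl (1 : Int))]
  | succ n ih =>
    have hcast : ((n + 1 : Nat) : Int) = (n : Int) + 1 := by push_cast; ring
    rw [hcast]
    rw [PySem.List.pyRange_one_succ_right (show (1 : Int) ≤ (n : Int) + 1 by omega),
        List.flatMap_append, ← List.append_assoc, ← ih]
    simp only [List.flatMap_cons, List.flatMap_nil, List.append_nil]
    have harg : (n : Int) + 1 - 1 = (n : Int) := by ring
    rw [harg]
    have hstep : ((n : Int) + 1) * ipb = (n : Int) * ipb + ipb := by ring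
    by_cases hpos : 0 ≤ ir + (n : Int) * ipb
    · rw [show max (ir + (n : Int) * ipb) 0 = ir + (n : Int) * ipb by omega]
      exact PySem.List.pyRange_one_append 0 _ _ hpos (by linarith [hstep])
    · rw [show max (ir + (n : Int) * ipb) 0 = 0 by omega,
        PySem.List.pyRange_one_eq_nil (show ir + (n : Int) * ipb ≤ 0 by omega),
        List.nil_append]

-- ===== VERDICT (by name: the statement is the Claim_ definition above) =====
theorem delete_indices_at_batch_spec : Claim_equal_delete_indices_at_batch := by
  intro bn ir ipb dp ml _
  unfold Spec_delete_indices_at_batch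
  by_cases hbn : bn ≤ 0
  · simp [delete_indices_at_batch, delete_indices_at_batch_alt, hbn]
  by_cases hdp0 : dp ≤ 0
  · simp [delete_indices_at_batch, delete_indices_at_batch_alt, hbn, hdp0]
  have hdp : 0 < dp := by omega
  simp only [delete_indices_at_batch, delete_indices_at_batch_alt, max_k_at_batch,
    if_neg hbn, if_neg hdp0]
  rw [PySem.List.foldl_append_ite_eq_filter, List.nil_append]
  by_cases hipb : 0 < ipb
  · -- the scan covers the initial segment plus bn birth stripes
    rw [if_pos hipb]
    have hbn' : ((bn.toNat : Int)) = bn := by omega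
    have hdec := range_decomp ir ipb hipb bn.toNat
    rw [hbn'] at hdec
    rw [hdec, List.filter_append, List.filter_flatMap]
    -- initial segment: min ir upper = ir
    have hup : ir + ipb ≤ ir + bn * ipb := by nlinarith
    have hmin : min ir (ir + bn * ipb) = ir := by omega
    rw [hmin]
    rw [stripe0_filter hdp (le_refl ir)]
    rw [PySem.List.foldl_append_eq_flatMap]
    congr 1
    -- stripes: collapse to the residue window [a, b)
    have hstep : ∀ t : Int, (1 ≤ t ∧ t < bn + 1) →
        (PySem.List.pyRange (max (ir + (t - 1) * ipb) 0) (ir + t * ipb) 1).filter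
            (fun k => decide (death_tick? k ir ipb dp ml = some bn))
          = if max 1 (bn - ml - dp + 1) ≤ t ∧ t < min bn (bn - ml) + 1 then
              emit (ir + (t - 1) * ipb) (ir + t * ipb) (bn - ml - t) dp
            else [] := by
      intro t htt
      rw [stripeT_filter hdp hipb htt.1]
      congr 1
      simp only [eq_iff_iff]
      omega
    by_cases hab : max 1 (bn - ml - dp + 1) < min bn (bn - ml) + 1
    · -- nonempty window: split [1, bn+1) at a and b
      rw [PySem.List.pyRange_one_append 1 (max 1 (bn - ml - dp + 1)) (bn + 1)
            (by omega) (by omega),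
          PySem.List.pyRange_one_append (max 1 (bn - ml - dp + 1))
            (min bn (bn - ml) + 1) (bn + 1) (by omega) (by omega),
          List.flatMap_append, List.flatMap_append]
      have hleft : (PySem.List.pyRange 1 (max 1 (bn - ml - dp + 1)) 1).flatMap
          (fun t => (PySem.List.pyRange (max (ir + (t - 1) * ipb) 0) (ir + t * ipb) 1).filter
            (fun k => decide (death_tick? k ir ipb dp ml = some bn))) = [] := by
        apply List.flatMap_eq_nil_iff.mpr
        intro t htm
        rw [PySem.List.mem_pyRange_one] at htm
        rw [hstep t (by omega), if_neg (by omega)]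
      have hright : (PySem.List.pyRange (min bn (bn - ml) + 1) (bn + 1) 1).flatMap
          (fun t => (PySem.List.pyRange (max (ir + (t - 1) * ipb) 0) (ir + t * ipb) 1).filter
            (fun k => decide (death_tick? k ir ipb dp ml = some bn))) = [] := by
        apply List.flatMap_eq_nil_iff.mpr
        intro t htm
        rw [PySem.List.mem_pyRange_one] at htm
        rw [hstep t (by omega), if_neg (by omega)]
      rw [hleft, hright, List.nil_append, List.append_nil]
      apply List.flatMap_congr
      intro t htm
      rw [PySem.List.mem_pyRange_one] at htm
      rw [hstep t (by omega), if_pos (by omega)]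
    · -- empty window: every stripe is empty, and B's loop runs zero times
      rw [PySem.List.pyRange_one_eq_nil (show min bn (bn - ml) + 1 ≤ max 1 (bn - ml - dp + 1) by omega),
          List.flatMap_nil]
      apply List.flatMap_eq_nil_iff.mpr
      intro t htm
      rw [PySem.List.mem_pyRange_one] at htm
      rw [hstep t (by omega), if_neg (by omega)]
  · -- no inserts: the whole scan is the initial-snapshot case
    rw [if_neg hipb]
    have hle : bn * ipb ≤ 0 := mul_nonpos_of_nonneg_of_nonpos (by omega) (by omega)
    have hmin : min ir (ir + bn * ipb) = ir + bn * ipb := by omega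
    rw [hmin]
    exact stripe0_filter hdp (by omega)
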